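-- pv_equiv track=rewrite | github.com/bkarras12/Brief-Engine-Web-app | app/tools/keyword_tools.py | check_keyword_in_headings
-- ===== SOURCE A (Python) =====
-- def extract_headings(markdown_text: str) -> list[dict]:
--     """Extract H2 and H3 headings from markdown text."""
--     headings = []
--     for line in markdown_text.split("\n"):
--         stripped = line.strip()
--         if stripped.startswith("### "):
--             headings.append({"level": 3, "text": stripped[4:].strip()})
--         elif stripped.startswith("## "):
--             headings.append({"level": 2, "text": stripped[3:].strip()})
--     return headings
--
-- def check_keyword_in_headings(markdown_text: str, keyword: str) -> dict:
--     """Check if the keyword appears in headings."""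
--     headings = extract_headings(markdown_text)
--     h2_with_kw = [h for h in headings if h["level"] == 2 and keyword.lower() in h["text"].lower()]
--     h3_with_kw = [h for h in headings if h["level"] == 3 and keyword.lower() in h["text"].lower()]
--     return {
--         "total_h2": len([h for h in headings if h["level"] == 2]),
--         "total_h3": len([h for h in headings if h["level"] == 3]),
--         "h2_with_keyword": len(h2_with_kw),
--         "h3_with_keyword": len(h3_with_kw),
--     }
-- ===== SOURCE B (Python) =====
-- def check_keyword_in_headings(markdown_text: str, keyword: str) -> dict:
--     """Single pass over the lines with four counters; no intermediate headings list."""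
--     kw = keyword.lower()
--     total_h2 = total_h3 = h2_kw = h3_kw = 0
--     for line in markdown_text.split("\n"):
--         stripped = line.strip()
--         if stripped.startswith("### "):
--             total_h3 += 1
--             if kw in stripped[4:].strip().lower():
--                 h3_kw += 1
--         elif stripped.startswith("## "):
--             total_h2 += 1
--             if kw in stripped[3:].strip().lower():
--                 h2_kw += 1
--     return {
--         "total_h2": total_h2,
--         "total_h3": total_h3,
--         "h2_with_keyword": h2_kw,
--         "h3_with_keyword": h3_kw,
--     }
-- ===== Notes on version B (the rewrite author's own statement) =====
-- stated objective: simpler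
-- what changed: B inlines extract_headings and replaces the headings list plus four list-comprehension scans with one pass over the lines maintaining four integer counters.
import Mathlib
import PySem

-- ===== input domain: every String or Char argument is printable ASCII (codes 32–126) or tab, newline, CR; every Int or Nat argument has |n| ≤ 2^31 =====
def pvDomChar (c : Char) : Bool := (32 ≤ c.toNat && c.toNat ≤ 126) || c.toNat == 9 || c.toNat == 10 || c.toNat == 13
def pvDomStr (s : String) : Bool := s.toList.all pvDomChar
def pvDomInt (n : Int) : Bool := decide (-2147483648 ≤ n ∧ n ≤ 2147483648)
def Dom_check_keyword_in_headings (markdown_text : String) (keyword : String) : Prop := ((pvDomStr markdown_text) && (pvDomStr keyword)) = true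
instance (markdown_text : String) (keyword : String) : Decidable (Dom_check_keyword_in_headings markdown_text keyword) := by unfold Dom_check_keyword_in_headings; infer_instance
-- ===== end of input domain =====

-- B inlines extract_headings and replaces the headings list and its four scans by one
-- counting pass over the lines (objective: simpler).


-- ===== PORT A =====
-- extract_headings: the loop appending to `headings`, as the obvious structural recursion
def extractHeadings : List String → List (Int × String)
  | [] => []
  | line :: rest =>
    let stripped := PySem.Str.strip line
    if PySem.Str.startswith stripped "### " then
      (3, PySem.Str.strip (PySem.Str.slice stripped (some 4) none)) :: extractHeadings rest
    else if PySem.Str.startswith stripped "## " then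
      (2, PySem.Str.strip (PySem.Str.slice stripped (some 3) none)) :: extractHeadings rest
    else extractHeadings rest

-- `.getD []` can never fire: split? returns some for the nonempty separator "\n"
def check_keyword_in_headings (markdown_text : String) (keyword : String) : List (String × Int) :=
  let headings := extractHeadings ((PySem.Str.split? markdown_text "\n").getD [])
  let h2_with_kw := headings.filter (fun h => h.1 == 2 && PySem.Str.isIn (PySem.Str.lower keyword) (PySem.Str.lower h.2))
  let h3_with_kw := headings.filter (fun h => h.1 == 3 && PySem.Str.isIn (PySem.Str.lower keyword) (PySem.Str.lower h.2))
  [ ("total_h2", ((headings.filter (fun h => h.1 == 2)).length : Int)),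
    ("total_h3", ((headings.filter (fun h => h.1 == 3)).length : Int)),
    ("h2_with_keyword", (h2_with_kw.length : Int)),
    ("h3_with_keyword", (h3_with_kw.length : Int)) ]

-- ===== PORT B =====
-- the body of B's single counting loop: one line updates the four counters
def stepB (kw : String) (acc : Int × Int × Int × Int) (line : String) : Int × Int × Int × Int :=
  let stripped := PySem.Str.strip line
  if PySem.Str.startswith stripped "### " then
    (acc.1, acc.2.1 + 1, acc.2.2.1,
     if PySem.Str.isIn kw (PySem.Str.lower (PySem.Str.strip (PySem.Str.slice stripped (some 4) none)))
     then acc.2.2.2 + 1 else acc.2.2.2)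
  else if PySem.Str.startswith stripped "## " then
    (acc.1 + 1, acc.2.1,
     if PySem.Str.isIn kw (PySem.Str.lower (PySem.Str.strip (PySem.Str.slice stripped (some 3) none)))
     then acc.2.2.1 + 1 else acc.2.2.1, acc.2.2.2)
  else acc

def check_keyword_in_headings_alt (markdown_text : String) (keyword : String) : List (String × Int) :=
  let r : Int × Int × Int × Int :=
    ((PySem.Str.split? markdown_text "\n").getD []).foldl (stepB (PySem.Str.lower keyword)) (0, 0, 0, 0)
  [ ("total_h2", r.1), ("total_h3", r.2.1),
    ("h2_with_keyword", r.2.2.1), ("h3_with_keyword", r.2.2.2) ]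

-- ===== PRECONDITION & SPEC =====
def Spec_check_keyword_in_headings (markdown_text : String) (keyword : String) (out : List (String × Int)) : Prop := out = check_keyword_in_headings_alt markdown_text keyword
instance (markdown_text : String) (keyword : String) (out : List (String × Int)) : Decidable (Spec_check_keyword_in_headings markdown_text keyword out) := by unfold Spec_check_keyword_in_headings; infer_instance

-- ===== CLAIM (what is proved, stated in full; the proofs are below) =====
def Claim_equal_check_keyword_in_headings : Prop := ∀ (markdown_text : String) (keyword : String), Dom_check_keyword_in_headings markdown_text keyword → Spec_check_keyword_in_headings markdown_text keyword (check_keyword_in_headings markdown_text keyword)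

-- ===== LEMMAS AND PROOFS =====

-- B's fold starting from any counters adds exactly the four counts A reads off the headings list.
theorem fold_counts (kw : String) (lines : List String) (a b c d : Int) :
    lines.foldl (stepB kw) (a, b, c, d)
    = (a + (((extractHeadings lines).filter (fun h => h.1 == 2)).length : Int),
       b + (((extractHeadings lines).filter (fun h => h.1 == 3)).length : Int),
       c + (((extractHeadings lines).filter (fun h => h.1 == 2 && PySem.Str.isIn kw (PySem.Str.lower h.2))).length : Int),
       d + (((extractHeadings lines).filter (fun h => h.1 == 3 && PySem.Str.isIn kw (PySem.Str.lower h.2))).length : Int)) := by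
  induction lines generalizing a b c d with
  | nil => simp [extractHeadings]
  | cons line rest ih =>
    have e32 : (((3:Int)) == ((2:Int))) = false := by decide
    have e33 : (((3:Int)) == ((3:Int))) = true := by decide
    have e22 : (((2:Int)) == ((2:Int))) = true := by decide
    have e23 : (((2:Int)) == ((3:Int))) = false := by decide
    rw [List.foldl_cons]
    by_cases h3 : PySem.Str.startswith (PySem.Str.strip line) "### " = true
    · have he : extractHeadings (line :: rest)
          = (3, PySem.Str.strip (PySem.Str.slice (PySem.Str.strip line) (some 4) none)) :: extractHeadings rest := by
        simp only [extractHeadings, h3, if_true]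
      by_cases hk : PySem.Str.isIn kw (PySem.Str.lower (PySem.Str.strip (PySem.Str.slice (PySem.Str.strip line) (some 4) none))) = true
      · have hs : stepB kw (a, b, c, d) line = (a, b + 1, c, d + 1) := by
          simp only [stepB, h3, hk, if_true]
        rw [hs, ih, he]
        simp only [List.filter_cons, e32, e33, hk, Bool.false_and, Bool.true_and, if_true,
          if_false, Bool.false_eq_true, List.length_cons, Prod.mk.injEq, Nat.cast_add, Nat.cast_one]
        and_intros <;> first | exact trivial | omega
      · rw [Bool.not_eq_true] at hk
        have hs : stepB kw (a, b, c, d) line = (a, b + 1, c, d) := by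
          simp only [stepB, h3, hk, if_true, if_false, Bool.false_eq_true]
        rw [hs, ih, he]
        simp only [List.filter_cons, e32, e33, hk, Bool.false_and, Bool.true_and, if_true,
          if_false, Bool.false_eq_true, List.length_cons, Prod.mk.injEq, Nat.cast_add, Nat.cast_one]
        and_intros <;> first | exact trivial | omega
    · rw [Bool.not_eq_true] at h3
      by_cases h2 : PySem.Str.startswith (PySem.Str.strip line) "## " = true
      · have he : extractHeadings (line :: rest)
            = (2, PySem.Str.strip (PySem.Str.slice (PySem.Str.strip line) (some 3) none)) :: extractHeadings rest := by
          simp only [extractHeadings, h3, h2, if_true, if_false, Bool.false_eq_true]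
        by_cases hk : PySem.Str.isIn kw (PySem.Str.lower (PySem.Str.strip (PySem.Str.slice (PySem.Str.strip line) (some 3) none))) = true
        · have hs : stepB kw (a, b, c, d) line = (a + 1, b, c + 1, d) := by
            simp only [stepB, h3, h2, hk, if_true, if_false, Bool.false_eq_true]
          rw [hs, ih, he]
          simp only [List.filter_cons, e22, e23, hk, Bool.false_and, Bool.true_and, if_true,
            if_false, Bool.false_eq_true, List.length_cons, Prod.mk.injEq, Nat.cast_add, Nat.cast_one]
          and_intros <;> first | exact trivial | omega
        · rw [Bool.not_eq_true] at hk
          have hs : stepB kw (a, b, c, d) line = (a + 1, b, c, d) := by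
            simp only [stepB, h3, h2, hk, if_true, if_false, Bool.false_eq_true]
          rw [hs, ih, he]
          simp only [List.filter_cons, e22, e23, hk, Bool.false_and, Bool.true_and, if_true,
            if_false, Bool.false_eq_true, List.length_cons, Prod.mk.injEq, Nat.cast_add, Nat.cast_one]
          and_intros <;> first | exact trivial | omega
      · rw [Bool.not_eq_true] at h2
        have he : extractHeadings (line :: rest) = extractHeadings rest := by
          simp only [extractHeadings, h3, h2, if_false, Bool.false_eq_true]
        have hs : stepB kw (a, b, c, d) line = (a, b, c, d) := by
          simp only [stepB, h3, h2, if_false, Bool.false_eq_true]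
        rw [hs, ih, he]

-- ===== VERDICT (by name: the statement is the Claim_ definition above) =====
theorem check_keyword_in_headings_spec : Claim_equal_check_keyword_in_headings := by
  intro md kw _
  show check_keyword_in_headings md kw = check_keyword_in_headings_alt md kw
  unfold check_keyword_in_headings check_keyword_in_headings_alt
  rw [fold_counts]
  simp
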